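-- pv_equiv track=rewrite | github.com/TynerG/Tyner-Leetcode-Adventure | top_interview_150/134_Gas_Station/my_solution.py | _startJourney
-- ===== SOURCE A (Python) =====
-- from typing import List
--
-- def _startJourney(gas: List[int], cost: List[int], start: int) -> bool:
--     tank = 0
--     for i in range(len(gas)):
--         departure = (i + start) % len(gas)
--         tank += gas[departure]
--         if tank >= cost[departure]:
--             tank -= cost[departure]
--         else:
--             return False
--
--     return True
-- ===== SOURCE B (Python) =====
-- from itertools import accumulate
-- from typing import List
--
-- def _startJourney(gas: List[int], cost: List[int], start: int) -> bool:
--     # Global prefix-sum table over the UNROTATED diff list, then two range-minimum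
--     # checks (pre-wrap segment, post-wrap segment) instead of simulating the trip.
--     n = len(gas)
--     if n == 0:
--         return True
--     P = list(accumulate((gas[i] - cost[i] for i in range(n)), initial=0))
--     s = start % n
--     if min(P[s + 1:]) < P[s]:
--         return False
--     return s == 0 or P[n] + min(P[1:s + 1]) >= P[s]
-- ===== Notes on version B (the rewrite author's own statement) =====
-- stated objective: alternative
-- what changed: Replaces A's rotated trip simulation (running tank with early return) by a global prefix-sum table over the unrotated difference list plus two range-minimum checks, one for the pre-wrap segment and one for the post-wrap segment.
-- outside the precondition, e.g. on _startJourney([0, 5], [1], 0): A returns False, B raises IndexError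
import Mathlib
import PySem

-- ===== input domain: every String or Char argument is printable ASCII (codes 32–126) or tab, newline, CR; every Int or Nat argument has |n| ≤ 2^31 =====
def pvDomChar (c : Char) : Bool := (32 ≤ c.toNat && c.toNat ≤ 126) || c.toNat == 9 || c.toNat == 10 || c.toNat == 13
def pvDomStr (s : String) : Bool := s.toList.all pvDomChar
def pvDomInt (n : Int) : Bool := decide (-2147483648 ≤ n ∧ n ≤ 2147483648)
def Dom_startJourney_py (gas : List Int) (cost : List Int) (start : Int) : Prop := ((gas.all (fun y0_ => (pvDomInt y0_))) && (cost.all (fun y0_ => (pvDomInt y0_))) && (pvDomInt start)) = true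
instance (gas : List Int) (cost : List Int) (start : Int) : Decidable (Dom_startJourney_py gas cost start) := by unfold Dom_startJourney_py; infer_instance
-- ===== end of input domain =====

-- B replaces A's rotated trip simulation (running tank, early return) by a global
-- prefix-sum table over the unrotated difference list plus two range-minimum checks.


-- ===== PORT A =====
-- A's loop over range(len(gas)) with running tank and early 'return False'
def startJourneyGoA (gas : List Int) (cost : List Int) (start : Int) (tank : Int) : List Int → Bool
  | [] => true
  | i :: rest =>
    let departure := PySem.Int.mod (i + start) (gas.length : Int)
    let tank1 := tank + PySem.List.pyGetD gas departure 0
    let c := PySem.List.pyGetD cost departure 0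
    if c ≤ tank1 then startJourneyGoA gas cost start (tank1 - c) rest else false

def startJourney_py (gas : List Int) (cost : List Int) (start : Int) : Bool :=
  startJourneyGoA gas cost start 0 (PySem.List.pyRange 0 (gas.length : Int) 1)

-- ===== PORT B =====
-- list(accumulate(it, initial=a)): running sums including the seed
def pvAccP (a : Int) : List Int → List Int
  | [] => [a]
  | x :: xs => a :: pvAccP (a + x) xs

-- B: prefix-sum table P of the unrotated diffs, then two range-minimum checks.
-- Python's min(...) raises on an empty list; under Pre_ both slices are nonempty
-- when evaluated (s+1 ≤ n, and the second slice only matters for s ≠ 0), so the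
-- `.getD 0` defaults are never the value used.
def startJourney_py_alt (gas : List Int) (cost : List Int) (start : Int) : Bool :=
  let n : Int := (gas.length : Int)
  if n = 0 then true
  else
    let P := pvAccP 0 ((PySem.List.pyRange 0 n 1).map (fun i =>
      PySem.List.pyGetD gas i 0 - PySem.List.pyGetD cost i 0))
    let s := PySem.Int.mod start n
    if (PySem.List.min? (PySem.List.slice P (some (s + 1)) none) (fun x => x)).getD 0 <
        PySem.List.pyGetD P s 0 then false
    else
      decide (s = 0) ||
        decide (PySem.List.pyGetD P s 0 ≤
          PySem.List.pyGetD P n 0 +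
            (PySem.List.min? (PySem.List.slice P (some 1) (some (s + 1))) (fun x => x)).getD 0)

-- ===== PRECONDITION & SPEC =====
-- Pre_ excludes inputs with cost shorter than gas: there both Pythons index cost
-- out of range and raise IndexError; A can reach an early 'return False' before the
-- missing index on some of them, while B (which builds all diffs first) raises.
def Pre_startJourney_py (gas : List Int) (cost : List Int) (_start : Int) : Prop :=
  gas.length ≤ cost.length
instance (gas : List Int) (cost : List Int) (start : Int) : Decidable (Pre_startJourney_py gas cost start) := by unfold Pre_startJourney_py; infer_instance

def pvWitness_startJourney_py : List Int × List Int × Int := ([1, 2, 3], [2, 1, 2], 1)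

def Spec_startJourney_py (gas : List Int) (cost : List Int) (start : Int) (out : Bool) : Prop := out = startJourney_py_alt gas cost start
instance (gas : List Int) (cost : List Int) (start : Int) (out : Bool) : Decidable (Spec_startJourney_py gas cost start out) := by unfold Spec_startJourney_py; infer_instance

-- ===== CLAIM (what is proved, stated in full; the proofs are below) =====
def Claim_equal_startJourney_py : Prop := ∀ (gas : List Int) (cost : List Int) (start : Int), Dom_startJourney_py gas cost start → Pre_startJourney_py gas cost start → Spec_startJourney_py gas cost start (startJourney_py gas cost start)

-- ===== LEMMAS AND PROOFS =====
-- running sums EXCLUDING the seed (proof-only characterisation of both loops)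
def pvSA (a : Int) : List Int → List Int
  | [] => []
  | x :: xs => (a + x) :: pvSA (a + x) xs

theorem pvAccP_eq_cons (a : Int) (l : List Int) : pvAccP a l = a :: pvSA a l := by
  induction l generalizing a with
  | nil => rfl
  | cons x xs ih => simp [pvAccP, pvSA, ih]

theorem pvSA_append (a : Int) (X Y : List Int) :
    pvSA a (X ++ Y) = pvSA a X ++ pvSA (a + X.sum) Y := by
  induction X generalizing a with
  | nil => simp [pvSA]
  | cons x xs ih => simp [pvSA, ih, add_assoc]

theorem pvSA_length (a : Int) (l : List Int) : (pvSA a l).length = l.length := by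
  induction l generalizing a with
  | nil => rfl
  | cons x xs ih => simp [pvSA, ih]

theorem pvSA_shift (c a : Int) (l : List Int) : pvSA (c + a) l = (pvSA a l).map (c + ·) := by
  induction l generalizing a with
  | nil => rfl
  | cons x xs ih => simp [pvSA, add_assoc, ih (a + x)]

-- A's loop with accumulator `tank` is "all running sums of the diffs, seeded at tank, are ≥ 0".
theorem startJourneyGoA_eq (gas cost : List Int) (start : Int) :
    ∀ (idxs : List Int) (tank : Int),
      startJourneyGoA gas cost start tank idxs =
      (pvSA tank (idxs.map (fun i =>
        let d := PySem.Int.mod (i + start) (gas.length : Int)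
        PySem.List.pyGetD gas d 0 - PySem.List.pyGetD cost d 0))).all (fun p => decide (0 ≤ p)) := by
  intro idxs
  induction idxs with
  | nil => intro tank; rfl
  | cons i rest ih =>
    intro tank
    simp only [startJourneyGoA, List.map_cons, pvSA, List.all_cons]
    set d := PySem.Int.mod (i + start) (gas.length : Int) with hd
    set g := PySem.List.pyGetD gas d 0 with hg
    set c := PySem.List.pyGetD cost d 0 with hc
    by_cases h : c ≤ tank + g
    · rw [if_pos h]
      have heq : tank + (g - c) = tank + g - c := by ring
      rw [heq, ih (tank + g - c)]
      have h0 : (0 : Int) ≤ tank + g - c := by omega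
      simp only [h0, decide_true, Bool.true_and]
    · rw [if_neg h]
      have : ¬ (0 ≤ tank + (g - c)) := by omega
      simp [this]

theorem pvMin_ge_iff (l : List Int) (hl : l ≠ []) (x : Int) :
    (x ≤ (PySem.List.min? l (fun y => y)).getD 0) ↔ (∀ y ∈ l, x ≤ y) := by
  cases hm : PySem.List.min? l (fun y => y) with
  | none => exact absurd ((PySem.List.min?_eq_none_iff l _).mp hm) hl
  | some m =>
    simp only [Option.getD_some]
    constructor
    · exact fun hx y hy => le_trans hx (PySem.List.min?_isMin hm y hy)
    · exact fun hall => hall m (PySem.List.min?_mem hm)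

theorem pvAccP_getElem? (a : Int) (l : List Int) (k : Nat) (hk : k ≤ l.length) :
    (pvAccP a l)[k]? = some (a + (l.take k).sum) := by
  induction l generalizing a k with
  | nil =>
    have hk0 : k = 0 := Nat.le_zero.mp hk
    subst hk0
    simp [pvAccP]
  | cons x xs ih =>
    cases k with
    | zero => simp [pvAccP]
    | succ k' =>
      simp only [pvAccP, List.getElem?_cons_succ, List.take_succ_cons, List.sum_cons]
      rw [ih (a + x) k' (by simpa using hk)]
      ring_nf

-- ===== VERDICT (by name: the statement is the Claim_ definition above) =====
theorem startJourney_py_spec : Claim_equal_startJourney_py := by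
  intro gas cost start _ hpre
  unfold Spec_startJourney_py startJourney_py startJourney_py_alt
  rcases Nat.eq_zero_or_pos gas.length with hgl | hgl
  · have hg : gas = [] := List.eq_nil_of_length_eq_zero hgl
    subst hg
    simp [startJourneyGoA, PySem.List.pyRange_one_eq_nil (le_refl (0 : Int))]
  · -- gas nonempty
    have hn0 : (0 : Int) < (gas.length : Int) := by exact_mod_cast hgl
    have hnne : ¬ ((gas.length : Int) = 0) := by omega
    rw [if_neg hnne]
    set gl := gas.length with hgldef
    set s := PySem.Int.mod start (gl : Int) with hsdef
    have hs0 : 0 ≤ s := PySem.Int.mod_nonneg start hn0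
    have hslt : s < (gl : Int) := PySem.Int.mod_lt start hn0
    set sN := s.toNat with hsNdef
    have hsN : (sN : Int) = s := Int.toNat_of_nonneg hs0
    have hsNlt : sN < gl := by omega
    set D := (List.range gl).map (fun k => gas.getD k 0 - cost.getD k 0) with hD
    have hDlen : D.length = gl := by simp [hD]
    set X := D.drop sN with hX
    set Y := D.take sN with hY
    have hYlen : Y.length = sN := by simp [hY, hDlen]; omega
    have hXlen : X.length = gl - sN := by simp [hX, hDlen]
    have hYX : Y ++ X = D := List.take_append_drop sN D
    have hsum : D.sum = Y.sum + X.sum := by rw [← hYX]; simp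
    -- A-side list is the rotation of D
    have hLA : (PySem.List.pyRange 0 (gl : Int) 1).map (fun i =>
        let d := PySem.Int.mod (i + start) (gas.length : Int)
        PySem.List.pyGetD gas d 0 - PySem.List.pyGetD cost d 0) = X ++ Y := by
      have hrot : X ++ Y = D.rotate sN :=
        (List.rotate_eq_drop_append_take (by rw [hDlen]; omega)).symm
      rw [hrot, PySem.List.pyRange_zero_nat gl]
      apply List.ext_getElem
      · simp [hDlen]
      · intro j h1 h2
        simp only [List.map_map, List.getElem_map, List.getElem_range, Function.comp_def]
        have hj : j < gl := by simpa using h1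
        have hmod : PySem.Int.mod ((j : Int) + start) (gas.length : Int) =
            (((j + sN) % gl : Nat) : Int) := by
          rw [PySem.Int.mod_eq_emod_of_pos hn0]
          have hstart : start % (gl : Int) = (sN : Int) := by
            rw [hsN, hsdef, PySem.Int.mod_eq_emod_of_pos hn0]
          push_cast
          conv_lhs => rw [Int.add_emod]
          conv_rhs => rw [Int.add_emod]
          rw [hstart, Int.emod_eq_of_lt (Int.natCast_nonneg sN) (by rw [hsN]; exact hslt)]
        rw [hmod, PySem.List.pyGetD_natCast, PySem.List.pyGetD_natCast,
            List.getElem_rotate D sN j h2]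
        have hk : (j + sN) % gl < gl := Nat.mod_lt _ hgl
        simp only [hD, List.getElem_map, List.getElem_range, List.length_map, List.length_range]
    -- B-side diff list is D
    have hLB : (PySem.List.pyRange 0 (gas.length : Int) 1).map (fun i =>
        PySem.List.pyGetD gas i 0 - PySem.List.pyGetD cost i 0) = D := by
      rw [PySem.List.pyRange_zero_nat gl]
      simp only [List.map_map, Function.comp_def, PySem.List.pyGetD_natCast]
      rfl
    -- values of the prefix-sum table
    have hgetD : ∀ (k : Nat), k ≤ gl →
        PySem.List.pyGetD (pvAccP 0 D) ((k : Nat) : Int) 0 = (D.take k).sum := by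
      intro k hk
      rw [PySem.List.pyGetD_natCast, List.getD_eq_getElem?_getD,
          pvAccP_getElem? 0 D k (by omega), Option.getD_some, zero_add]
    have hPs : PySem.List.pyGetD (pvAccP 0 D) s 0 = Y.sum := by
      rw [← hsN, hgetD sN (le_of_lt hsNlt), hY]
    have hPn : PySem.List.pyGetD (pvAccP 0 D) (gl : Int) 0 = D.sum := by
      rw [hgetD gl (le_refl gl), List.take_of_length_le (by omega)]
    -- slices of the prefix-sum table
    have hPcons : pvAccP 0 D = 0 :: (pvSA 0 Y ++ pvSA Y.sum X) := by
      rw [pvAccP_eq_cons, ← hYX, pvSA_append, zero_add]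
    have hlen1 : (pvSA 0 Y).length = sN := by rw [pvSA_length, hYlen]
    have hslice1 : PySem.List.slice (pvAccP 0 D) (some (s + 1)) none = pvSA Y.sum X := by
      rw [PySem.List.slice_from _ (by omega : (0:Int) ≤ s + 1)]
      have : (s + 1).toNat = sN + 1 := by omega
      rw [this, hPcons, List.drop_succ_cons, ← hlen1, List.drop_left]
    have hslice2 : PySem.List.slice (pvAccP 0 D) (some 1) (some (s + 1)) = pvSA 0 Y := by
      rw [PySem.List.slice_toNat _ (by norm_num) (by omega)]
      have h1 : (s + 1).toNat - (1 : Int).toNat = sN := by omega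
      rw [h1, hPcons, Int.toNat_one, List.drop_one, List.tail_cons, ← hlen1, List.take_left]
    have hne1 : pvSA Y.sum X ≠ [] := by
      intro h
      have := congrArg List.length h
      rw [pvSA_length, hXlen] at this
      simp at this
      omega
    rw [startJourneyGoA_eq, hLA, hLB]
    simp only []
    rw [hPs, hPn, hslice1, hslice2, pvSA_append, List.all_append]
    -- canonical propositions
    have hshiftX : pvSA Y.sum X = (pvSA 0 X).map (fun q => Y.sum + q) := by
      have := pvSA_shift Y.sum 0 X
      rw [add_zero] at this
      exact this
    have hm1 : (Y.sum ≤ (PySem.List.min? (pvSA Y.sum X) (fun x => x)).getD 0) ↔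
        (∀ q ∈ pvSA 0 X, (0:Int) ≤ q) := by
      rw [pvMin_ge_iff _ hne1, hshiftX]
      simp only [List.mem_map, forall_exists_index, and_imp]
      constructor
      · intro h q hq
        have := h (Y.sum + q) q hq rfl
        omega
      · intro h y q hq hyq
        have := h q hq
        omega
    by_cases h1 : ∀ q ∈ pvSA 0 X, (0:Int) ≤ q
    · have hnlt : ¬ ((PySem.List.min? (pvSA Y.sum X) (fun x => x)).getD 0 < Y.sum) :=
        not_lt.mpr (hm1.mpr h1)
      rw [if_neg hnlt]
      have hall1 : (pvSA 0 X).all (fun p => decide (0 ≤ p)) = true := by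
        simp only [List.all_eq_true, decide_eq_true_eq]
        exact h1
      rw [hall1, Bool.true_and]
      by_cases hz : sN = 0
      · have hsz : s = 0 := by omega
        have hYnil : Y = [] := by rw [hY, hz, List.take_zero]
        simp [hsz, hYnil, pvSA]
      · have hsz : ¬ (s = 0) := by omega
        have hne2 : pvSA 0 Y ≠ [] := by
          intro h
          have := congrArg List.length h
          rw [pvSA_length, hYlen] at this
          simp at this
          omega
        have hm2 : (Y.sum ≤ D.sum + (PySem.List.min? (pvSA 0 Y) (fun x => x)).getD 0) ↔
            (∀ q ∈ pvSA 0 Y, (0:Int) ≤ X.sum + q) := by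
          have hx := pvMin_ge_iff (pvSA 0 Y) hne2 (Y.sum - D.sum)
          constructor
          · intro h q hq
            have := hx.mp (by omega) q hq
            omega
          · intro h
            have : Y.sum - D.sum ≤ (PySem.List.min? (pvSA 0 Y) (fun x => x)).getD 0 := by
              apply hx.mpr
              intro y hy
              have := h y hy
              omega
            omega
        simp only [hsz, decide_false, Bool.false_or, zero_add]
        by_cases h2 : ∀ q ∈ pvSA 0 Y, (0:Int) ≤ X.sum + q
        · have hb : (Y.sum ≤ D.sum + (PySem.List.min? (pvSA 0 Y) (fun x => x)).getD 0) :=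
            hm2.mpr h2
          simp only [hb, decide_true]
          simp only [List.all_eq_true, decide_eq_true_eq]
          have hshiftY : pvSA X.sum Y = (pvSA 0 Y).map (fun q => X.sum + q) := by
            have := pvSA_shift X.sum 0 Y
            rw [add_zero] at this
            exact this
          rw [hshiftY]
          simp only [List.mem_map, forall_exists_index, and_imp]
          intro y q hq hyq
          subst hyq
          exact h2 q hq
        · have hb : ¬ (Y.sum ≤ D.sum + (PySem.List.min? (pvSA 0 Y) (fun x => x)).getD 0) :=
            fun h => h2 (hm2.mp h)
          simp only [hb, decide_false]
          push_neg at h2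
          obtain ⟨q, hq, hqlt⟩ := h2
          have hshiftY : pvSA X.sum Y = (pvSA 0 Y).map (fun q => X.sum + q) := by
            have := pvSA_shift X.sum 0 Y
            rw [add_zero] at this
            exact this
          rw [hshiftY]
          simp only [List.all_eq_false, List.mem_map, decide_eq_true_eq]
          exact ⟨X.sum + q, ⟨q, hq, rfl⟩, by omega⟩
    · have hlt : (PySem.List.min? (pvSA Y.sum X) (fun x => x)).getD 0 < Y.sum := by
        by_contra h
        exact h1 (hm1.mp (not_lt.mp h))
      rw [if_pos hlt]
      push_neg at h1
      obtain ⟨q, hq, hqlt⟩ := h1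
      have : (pvSA 0 X).all (fun p => decide (0 ≤ p)) = false := by
        simp only [List.all_eq_false, decide_eq_true_eq]
        exact ⟨q, hq, by omega⟩
      rw [this, Bool.false_and]
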